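-- pv_equiv track=rewrite | github.com/finlaymcnally/RecipeImporter | cookimport/runs/stage_observability.py | _count_value_rows
-- ===== SOURCE A (Python) =====
-- from collections import Counter
-- from typing import Any, Mapping
--
-- def _count_value_rows(
--     rows: list[dict[str, Any]],
--     key: str,
-- ) -> dict[str, int]:
--     counts: Counter[str] = Counter()
--     for row in rows:
--         value = str(row.get(key) or "").strip()
--         if value:
--             counts[value] += 1
--     return dict(sorted(counts.items()))
-- ===== SOURCE B (Python) =====
-- from itertools import groupby
--
--
-- def _count_value_rows(rows, key):
--     values = sorted(v for row in rows if (v := str(row.get(key) or "").strip()))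
--     return {k: sum(1 for _ in g) for k, g in groupby(values)}
-- ===== Notes on version B (the rewrite author's own statement) =====
-- stated objective: alternative
-- what changed: A tallies values in a Counter while scanning the rows and then sorts the (key,count) items; B collects the non-empty stripped values into a list, sorts that list once, and emits one (value, run length) pair per run via itertools.groupby, so no Counter and no final sort of pairs is needed.
import Mathlib
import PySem

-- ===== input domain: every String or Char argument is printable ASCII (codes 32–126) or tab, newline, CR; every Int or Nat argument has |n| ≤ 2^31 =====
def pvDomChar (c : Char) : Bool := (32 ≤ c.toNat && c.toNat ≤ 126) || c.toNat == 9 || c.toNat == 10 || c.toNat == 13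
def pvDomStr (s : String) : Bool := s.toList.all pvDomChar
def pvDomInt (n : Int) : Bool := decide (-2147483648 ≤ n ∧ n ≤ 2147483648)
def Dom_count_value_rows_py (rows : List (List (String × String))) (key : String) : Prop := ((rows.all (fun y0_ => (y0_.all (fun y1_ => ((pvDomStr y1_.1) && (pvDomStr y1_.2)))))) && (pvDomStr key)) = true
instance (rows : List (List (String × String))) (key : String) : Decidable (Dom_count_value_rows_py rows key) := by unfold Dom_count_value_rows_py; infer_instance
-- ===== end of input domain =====

-- B replaces A's Counter-then-sort with sort-the-values-then-group-runs (itertools.groupby);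
-- equivalence of the RETURN value is proved; neither version mutates its arguments.

-- shared helper: str(row.get(key) or "").strip()  (identical line in both Pythons)
def pvRowVal (row : List (String × String)) (key : String) : String :=
  PySem.Str.strip (((row.find? (fun p => p.1 == key)).map (·.2)).getD "")

-- ===== PORT A =====
def count_value_rows_py (rows : List (List (String × String))) (key : String) : List (String × Int) :=
  let counts : PySem.Dict String Int :=
    rows.foldl (fun counts row =>
      let value := pvRowVal row key
      if value ≠ "" then counts.modify value 0 (· + 1) else counts) PySem.Dict.empty
  PySem.List.sorted2 counts.items (fun p => p.1) (fun p => p.2)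

-- ===== PORT B =====
-- run-length scan of the sorted value list (the groupby comprehension of Source B)
def pvRunLength : List String → List (String × Int)
  | [] => []
  | x :: xs =>
      (x, ((xs.takeWhile (· == x)).length : Int) + 1) :: pvRunLength (xs.dropWhile (· == x))
  termination_by l => l.length
  decreasing_by simpa using Nat.lt_succ_of_le (List.Sublist.length_le (List.dropWhile_sublist _))

def count_value_rows_py_alt (rows : List (List (String × String))) (key : String) : List (String × Int) :=
  let values := PySem.List.sorted
    (rows.filterMap (fun row =>
      let v := pvRowVal row key
      if v ≠ "" then some v else none)) (fun x => x)
  pvRunLength values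

-- ===== PRECONDITION & SPEC =====
def Spec_count_value_rows_py (rows : List (List (String × String))) (key : String) (out : List (String × Int)) : Prop := out = count_value_rows_py_alt rows key
instance (rows : List (List (String × String))) (key : String) (out : List (String × Int)) : Decidable (Spec_count_value_rows_py rows key out) := by unfold Spec_count_value_rows_py; infer_instance

-- ===== CLAIM (what is proved, stated in full; the proofs are below) =====
def Claim_equal_count_value_rows_py : Prop := ∀ (rows : List (List (String × String))) (key : String), Dom_count_value_rows_py rows key → Spec_count_value_rows_py rows key (count_value_rows_py rows key)

-- ===== LEMMAS AND PROOFS =====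

-- the filtered multiset of values both programs count
def pvVals (rows : List (List (String × String))) (key : String) : List String :=
  rows.filterMap (fun row =>
    let v := pvRowVal row key
    if v ≠ "" then some v else none)

-- the canonical result both programs compute
def pvCanon (vs : List String) : List (String × Int) :=
  (PySem.List.sorted (PySem.Set.ofList vs) (fun x => x)).map (fun k => (k, (vs.count k : Int)))

theorem pv_fold_eq_counter (key : String) (rows : List (List (String × String)))
    (d : PySem.Dict String Int) :
    rows.foldl (fun counts row =>
      let value := pvRowVal row key
      if value ≠ "" then counts.modify value 0 (· + 1) else counts) d
    = (pvVals rows key).foldl (fun d x => d.modify x 0 (· + 1)) d := by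
  induction rows generalizing d with
  | nil => rfl
  | cons r rs ih =>
      simp only [pvVals, List.foldl_cons, List.filterMap_cons]
      split_ifs with h
      · simp only [List.foldl_cons]; exact ih _
      · exact ih _

theorem pv_insertBy_congr {α : Type} (f g : α → α → Bool) (x : α) (ys : List α)
    (h : ∀ y ∈ ys, f x y = g x y) :
    PySem.List.insertBy f x ys = PySem.List.insertBy g x ys := by
  induction ys with
  | nil => rfl
  | cons y ys ih =>
      simp only [PySem.List.insertBy]
      rw [h y (by simp)]
      by_cases hg : g x y = true
      · simp [hg]
      · simp only [Bool.not_eq_true] at hg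
        simp [hg]
        exact ih (fun z hz => h z (by simp [hz]))

theorem pv_foldl_insertBy_congr {α : Type} (S : List α) (f g : α → α → Bool)
    (hfg : ∀ a ∈ S, ∀ b ∈ S, f a b = g a b) :
    ∀ (l acc : List α), (∀ x ∈ l, x ∈ S) → (∀ x ∈ acc, x ∈ S) →
      l.foldl (fun acc x => PySem.List.insertBy f x acc) acc
      = l.foldl (fun acc x => PySem.List.insertBy g x acc) acc := by
  intro l
  induction l with
  | nil => intro acc _ _; rfl
  | cons x xs ih =>
      intro acc hl hacc
      simp only [List.foldl_cons]
      have hx : x ∈ S := hl x (by simp)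
      have hcong : PySem.List.insertBy f x acc = PySem.List.insertBy g x acc :=
        pv_insertBy_congr f g x acc (fun y hy => hfg x hx y (hacc y hy))
      rw [hcong]
      exact ih _ (fun z hz => hl z (by simp [hz]))
        (fun z hz => by
          have := (PySem.List.insertBy_perm g x acc).mem_iff.mp hz
          rcases List.mem_cons.mp this with h | h
          · exact h ▸ hx
          · exact hacc z h)

theorem pv_sorted2_eq_sorted_fst (l : List (String × Int))
    (hinj : ∀ a ∈ l, ∀ b ∈ l, a.1 = b.1 → a = b) :
    PySem.List.sorted2 l (fun p => p.1) (fun p => p.2)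
    = PySem.List.sorted l (fun p => p.1) := by
  simp only [PySem.List.sorted2, PySem.List.sorted, if_neg (by decide : ¬ (false = true))]
  apply pv_foldl_insertBy_congr l _ _ _ l [] (fun x hx => hx) (by simp)
  intro a ha b hb
  rcases lt_trichotomy a.1 b.1 with h | h | h
  · simp [h, not_lt_of_gt h]
  · have : a = b := hinj a ha b hb h
    subst this
    simp
  · simp [h, not_lt_of_gt h]

theorem pv_A_eq_canon (rows : List (List (String × String))) (key : String) :
    count_value_rows_py rows key = pvCanon (pvVals rows key) := by
  unfold count_value_rows_py
  rw [pv_fold_eq_counter]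
  rw [show (pvVals rows key).foldl (fun d x => d.modify x 0 (· + 1)) PySem.Dict.empty
      = PySem.Dict.counter (pvVals rows key) from rfl]
  show PySem.List.sorted2 (PySem.Dict.counter (pvVals rows key)).items
      (fun p => p.1) (fun p => p.2) = pvCanon (pvVals rows key)
  rw [PySem.Dict.items_counter]
  set vs := pvVals rows key with hvs
  rw [pv_sorted2_eq_sorted_fst]
  · apply PySem.List.sorted_eq_of_perm_of_pairwise_lt
    · exact ((PySem.List.sorted_perm (PySem.Set.ofList vs) (fun x => x) false).map _)
    · exact List.Pairwise.map _ (fun a b h => h)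
        (PySem.List.sorted_ofList_pairwise_lt vs)
  · rintro a ha b hb hab
    simp only [List.mem_map] at ha hb
    obtain ⟨k1, _, rfl⟩ := ha
    obtain ⟨k2, _, rfl⟩ := hb
    simp only at hab
    subst hab
    rfl

theorem pv_runLength_sorted (l : List String) (hp : l.Pairwise (· ≤ ·)) :
    pvRunLength l = (PySem.List.sorted (PySem.Set.ofList l) (fun x => x)).map
      (fun k => (k, (l.count k : Int))) := by
  induction l using pvRunLength.induct with
  | case1 => simp [pvRunLength]; rfl
  | case2 x xs ih =>
      obtain ⟨hxall, hxs⟩ := List.pairwise_cons.mp hp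
      set w := xs.takeWhile (· == x) with hw
      set t := xs.dropWhile (· == x) with ht
      have hwt : w ++ t = xs := List.takeWhile_append_dropWhile
      have hwx : ∀ y ∈ w, y = x := fun y hy => by
        simpa using List.mem_takeWhile_imp hy
      have hsub : t.Sublist xs := by rw [ht]; exact List.dropWhile_sublist _
      have hpt : t.Pairwise (· ≤ ·) := hxs.sublist hsub
      have hmem : ∀ a, a ∈ PySem.List.sorted (PySem.Set.ofList t) (fun k => k) → a ∈ t := by
        intro a ha
        rw [PySem.List.mem_sorted, PySem.Set.mem_ofList] at ha
        exact ha
      have hxt : ∀ y ∈ t, x < y := by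
        cases htc : t with
        | nil => simp
        | cons z t' =>
            have hhead := List.head?_dropWhile_not (fun y => y == x) xs
            rw [← ht, htc] at hhead
            simp only [List.head?_cons] at hhead
            have hzx : z ≠ x := by simpa using hhead
            have hzt : z ∈ t := by rw [htc]; exact List.mem_cons_self
            have hzxs : z ∈ xs := hsub.mem hzt
            have hxz : x < z := lt_of_le_of_ne (hxall z hzxs) (Ne.symm hzx)
            intro y hy
            rcases List.mem_cons.mp hy with rfl | hy'
            · exact hxz
            · exact lt_of_lt_of_le hxz
                ((List.pairwise_cons.mp (htc ▸ hpt)).1 y hy')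
      have hxnott : x ∉ t := fun hx => lt_irrefl x (hxt x hx)
      -- the sorted set of x::xs is x consed on the sorted set of t
      have hsort : PySem.List.sorted (PySem.Set.ofList (x :: xs)) (fun k => k)
          = x :: PySem.List.sorted (PySem.Set.ofList t) (fun k => k) := by
        apply PySem.List.sorted_eq_of_perm_of_pairwise_lt
        · rw [List.perm_ext_iff_of_nodup]
          · intro a
            simp only [List.mem_cons, PySem.List.mem_sorted, PySem.Set.mem_ofList]
            constructor
            · rintro (rfl | hat)
              · exact Or.inl rfl
              · exact Or.inr (by rw [← hwt]; exact List.mem_append_right _ hat)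
            · rintro (rfl | haxs)
              · exact Or.inl rfl
              · rw [← hwt] at haxs
                rcases List.mem_append.mp haxs with haw | hat
                · exact Or.inl (hwx _ haw)
                · exact Or.inr hat
          · constructor
            · intro a ha h
              exact hxnott (by rw [h]; exact hmem a ha)
            · exact ((PySem.List.sorted_perm _ _ _).nodup_iff).mpr (PySem.Set.nodup_ofList t)
          · exact PySem.Set.nodup_ofList (x :: xs)
        · rw [List.pairwise_cons]
          exact ⟨fun y hy => hxt y (hmem y hy), PySem.List.sorted_ofList_pairwise_lt t⟩
      have hcx : (x :: xs).count x = w.length + 1 := by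
        rw [List.count_cons_self, ← hwt, List.count_append]
        rw [List.count_eq_length.mpr (fun b hb => (hwx b hb).symm),
          List.count_eq_zero.mpr hxnott]
      have hct : ∀ k ∈ t, (x :: xs).count k = t.count k := by
        intro k hk
        have hkx : k ≠ x := fun h => hxnott (h ▸ hk)
        rw [← hwt]
        simp [List.count_append, Ne.symm hkx,
          List.count_eq_zero.mpr (fun hkw => hkx (hwx k hkw))]
      show pvRunLength (x :: xs) = _
      rw [pvRunLength, hsort]
      simp only [List.map_cons, ← hw, ← ht]
      congr 1
      · rw [hcx]; push_cast; ring_nf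
      · rw [ih hpt]
        apply List.map_congr_left
        intro k hk
        have hkt : k ∈ t := hmem k hk
        rw [hct k hkt]

theorem pv_B_eq_canon (rows : List (List (String × String))) (key : String) :
    count_value_rows_py_alt rows key = pvCanon (pvVals rows key) := by
  unfold count_value_rows_py_alt
  set vs := pvVals rows key with hvs
  show pvRunLength (PySem.List.sorted vs (fun x => x)) = pvCanon vs
  set sl := PySem.List.sorted vs (fun x => x) with hsl
  have hperm : sl.Perm vs := PySem.List.sorted_perm vs (fun x => x) false
  rw [pv_runLength_sorted sl (PySem.List.sorted_pairwise vs (fun x => x))]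
  have hof : PySem.List.sorted (PySem.Set.ofList sl) (fun x => x)
      = PySem.List.sorted (PySem.Set.ofList vs) (fun x => x) := by
    apply PySem.List.sorted_eq_sorted_of_perm _ _ _ (fun a b h => h)
    rw [List.perm_ext_iff_of_nodup (PySem.Set.nodup_ofList sl) (PySem.Set.nodup_ofList vs)]
    intro a
    rw [PySem.Set.mem_ofList, PySem.Set.mem_ofList]
    exact hperm.mem_iff
  rw [hof]
  unfold pvCanon
  apply List.map_congr_left
  intro k _
  rw [hperm.count_eq]

-- ===== VERDICT (by name: the statement is the Claim_ definition above) =====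
theorem count_value_rows_py_spec : Claim_equal_count_value_rows_py := by
  intro rows key _
  unfold Spec_count_value_rows_py
  rw [pv_A_eq_canon, pv_B_eq_canon]
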